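-- pv_equiv track=rewrite | github.com/YangZhou1997/sgxnic-figuredraw | plot_gem5.py | get_cpuids_from_name
-- ===== SOURCE A (Python) =====
-- from collections import defaultdict
--
-- def get_cpuids_from_name(nfs_str):
--     nf_cpu_ids = defaultdict(lambda : [])
--     nfs = nfs_str.split('.')
--     nf_num = len(nfs)
--     if 'dpi' in nfs:
--         nf_num += 16
--
--     if nf_num == 1:
--         nf_cpu_ids[nfs[0]] = ['']
--     elif nf_num < 10:
--         idx = 0
--         for nf in nfs:
--             if nf == 'dpi':
--                 nf_cpu_ids[nf] = [f'{i}' for i in range(idx, idx + 16 + 1)]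
--                 idx += 16 + 1
--             else:
--                 nf_cpu_ids[nf] = [f'{i}' for i in range(idx, idx + 1)]
--                 idx += 1
--     else:
--         idx = 0
--         for nf in nfs:
--             if nf == 'dpi':
--                 nf_cpu_ids[nf] = ['{:0>2d}'.format(i) for i in range(idx, idx + 16 + 1)]
--                 idx += 16 + 1
--             else:
--                 nf_cpu_ids[nf] = ['{:0>2d}'.format(i) for i in range(idx, idx + 1)]
--                 idx += 1
--
--     return nf_cpu_ids
-- ===== SOURCE B (Python) =====
-- from collections import defaultdict
--
-- def get_cpuids_from_name(nfs_str):
--     nf_cpu_ids = defaultdict(lambda: [])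
--     nfs = nfs_str.split('.')
--     nf_num = len(nfs) + (16 if 'dpi' in nfs else 0)
--     if nf_num == 1:
--         nf_cpu_ids[nfs[0]] = ['']
--         return nf_cpu_ids
--     fmt = '{}'.format if nf_num < 10 else '{:0>2d}'.format
--     total = sum(17 if nf == 'dpi' else 1 for nf in nfs)
--     labels = [fmt(i) for i in range(total)]
--
--     def assign(rest, pool):
--         if rest:
--             w = 17 if rest[0] == 'dpi' else 1
--             nf_cpu_ids[rest[0]] = pool[:w]
--             assign(rest[1:], pool[w:])
--
--     assign(nfs, labels)
--     return nf_cpu_ids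
-- ===== Notes on version B (the rewrite author's own statement) =====
-- stated objective: alternative
-- what changed: Instead of A's running-index loop that generates each nf's id range in place, B pre-builds one global list of all formatted id labels (one range over the total width) and then recursively partitions that list by slicing, so no per-nf index arithmetic or range generation remains.
import Mathlib
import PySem

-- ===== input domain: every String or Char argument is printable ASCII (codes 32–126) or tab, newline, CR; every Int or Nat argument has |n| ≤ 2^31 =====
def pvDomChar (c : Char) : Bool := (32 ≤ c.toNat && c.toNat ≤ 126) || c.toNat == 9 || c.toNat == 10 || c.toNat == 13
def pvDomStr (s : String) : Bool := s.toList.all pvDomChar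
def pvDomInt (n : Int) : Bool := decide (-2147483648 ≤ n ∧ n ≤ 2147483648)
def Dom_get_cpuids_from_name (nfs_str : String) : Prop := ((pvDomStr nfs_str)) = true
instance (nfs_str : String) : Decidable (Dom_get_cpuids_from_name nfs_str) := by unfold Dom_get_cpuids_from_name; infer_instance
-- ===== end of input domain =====

-- B pre-builds one global list of all formatted id labels and recursively partitions it by
-- slicing, instead of A's running-index loop generating each range in place (objective: alternative).

-- ===== PORT A =====

-- '{:0>2d}'.format(i): left-pad the decimal string with '0' to width 2 (exact for the
-- values reached here; hand-ported since PySem has no format).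
def pvFmt2 (i : Int) : String :=
  let s := PySem.Int.toStr i
  if s.toList.length < 2 then "0" ++ s else s

def get_cpuids_from_name (nfs_str : String) : List (String × List String) :=
  let nfs := (PySem.Str.split? nfs_str ".").getD []
  let nf_num : Int := if nfs.contains "dpi" then (nfs.length : Int) + 16 else (nfs.length : Int)
  if nf_num = 1 then
    ((PySem.Dict.empty : PySem.Dict String (List String)).insert (nfs.headD "") [""]).items
  else if nf_num < 10 then
    (nfs.foldl (fun (st : PySem.Dict String (List String) × Int) nf =>
        if nf = "dpi" then
          (st.1.insert nf ((PySem.List.pyRange st.2 (st.2 + 16 + 1) 1).map PySem.Int.toStr), st.2 + 16 + 1)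
        else
          (st.1.insert nf ((PySem.List.pyRange st.2 (st.2 + 1) 1).map PySem.Int.toStr), st.2 + 1))
      (PySem.Dict.empty, 0)).1.items
  else
    (nfs.foldl (fun (st : PySem.Dict String (List String) × Int) nf =>
        if nf = "dpi" then
          (st.1.insert nf ((PySem.List.pyRange st.2 (st.2 + 16 + 1) 1).map pvFmt2), st.2 + 16 + 1)
        else
          (st.1.insert nf ((PySem.List.pyRange st.2 (st.2 + 1) 1).map pvFmt2), st.2 + 1))
      (PySem.Dict.empty, 0)).1.items

-- ===== PORT B =====

-- B's recursive helper 'assign(rest, pool)': peel the first nf's width off the label pool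
-- (Python slices pool[:w] / pool[w:]) and recurse; the dict is threaded explicitly.
def pvAssign : List String → List String → PySem.Dict String (List String) → PySem.Dict String (List String)
  | [], _, d => d
  | nf :: tl, pool, d =>
    let w : Int := if nf = "dpi" then 17 else 1
    pvAssign tl (PySem.List.slice pool (some w) none) (d.insert nf (PySem.List.slice pool none (some w)))

def get_cpuids_from_name_alt (nfs_str : String) : List (String × List String) :=
  let nfs := (PySem.Str.split? nfs_str ".").getD []
  let nf_num : Int := (nfs.length : Int) + (if nfs.contains "dpi" then 16 else 0)
  if nf_num = 1 then
    ((PySem.Dict.empty : PySem.Dict String (List String)).insert (nfs.headD "") [""]).items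
  else
    let fmt : Int → String := if nf_num < 10 then PySem.Int.toStr else pvFmt2
    let total : Int := nfs.foldl (fun s nf => s + (if nf = "dpi" then 17 else 1)) 0
    let labels := (PySem.List.pyRange 0 total 1).map fmt
    (pvAssign nfs labels PySem.Dict.empty).items

-- ===== PRECONDITION & SPEC =====
def Spec_get_cpuids_from_name (nfs_str : String) (out : List (String × List String)) : Prop := out = get_cpuids_from_name_alt nfs_str
instance (nfs_str : String) (out : List (String × List String)) : Decidable (Spec_get_cpuids_from_name nfs_str out) := by unfold Spec_get_cpuids_from_name; infer_instance

-- ===== CLAIM (what is proved, stated in full; the proofs are below) =====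
def Claim_equal_get_cpuids_from_name : Prop := ∀ (nfs_str : String), Dom_get_cpuids_from_name nfs_str → Spec_get_cpuids_from_name nfs_str (get_cpuids_from_name nfs_str)

-- ===== LEMMAS AND PROOFS =====

def pvW (nf : String) : Int := if nf = "dpi" then 17 else 1

def pvSumW (nfs : List String) : Int := nfs.foldl (fun s nf => s + pvW nf) 0

-- A's loop with formatter fmt, abstracted over the start state.
def pvLoopA (fmt : Int → String) (nfs : List String)
    (st : PySem.Dict String (List String) × Int) : PySem.Dict String (List String) × Int :=
  nfs.foldl (fun st nf =>
    if nf = "dpi" then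
      (st.1.insert nf ((PySem.List.pyRange st.2 (st.2 + 16 + 1) 1).map fmt), st.2 + 16 + 1)
    else
      (st.1.insert nf ((PySem.List.pyRange st.2 (st.2 + 1) 1).map fmt), st.2 + 1)) st

lemma pvSumW_shift : ∀ (l : List String) (a : Int),
    l.foldl (fun s nf => s + pvW nf) a = a + pvSumW l := by
  intro l
  induction l with
  | nil => intro a; simp [pvSumW]
  | cons x xs ih =>
    intro a
    unfold pvSumW
    rw [List.foldl_cons, List.foldl_cons, ih, ih (0 + pvW x)]
    ring

lemma pvSumW_cons (x : String) (tl : List String) : pvSumW (x :: tl) = pvW x + pvSumW tl := by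
  unfold pvSumW
  rw [List.foldl_cons, pvSumW_shift]
  change 0 + pvW x + pvSumW tl = pvW x + pvSumW tl
  ring

lemma pvSumW_nonneg : ∀ (l : List String), 0 ≤ pvSumW l := by
  intro l
  induction l with
  | nil => simp [pvSumW]
  | cons x xs ih =>
    rw [pvSumW_cons]
    have : (1:Int) ≤ pvW x := by unfold pvW; split <;> norm_num
    omega

lemma pvW_pos (nf : String) : 0 < pvW nf := by unfold pvW; split <;> norm_num

lemma pvLoop_eq_assign (fmt : Int → String) :
    ∀ (nfs : List String) (d : PySem.Dict String (List String)) (idx : Int),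
      (pvLoopA fmt nfs (d, idx)).1 =
        pvAssign nfs ((PySem.List.pyRange idx (idx + pvSumW nfs) 1).map fmt) d := by
  intro nfs
  induction nfs with
  | nil => intro d idx; simp [pvLoopA, pvAssign]
  | cons x tl ih =>
    intro d idx
    have hw := pvW_pos x
    have hs := pvSumW_nonneg tl
    have hsplit : PySem.List.pyRange idx (idx + pvSumW (x :: tl)) 1 =
        PySem.List.pyRange idx (idx + pvW x) 1 ++
          PySem.List.pyRange (idx + pvW x) (idx + pvSumW (x :: tl)) 1 := by
      refine PySem.List.pyRange_one_append idx (idx + pvW x) (idx + pvSumW (x :: tl)) (by omega) ?_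
      rw [pvSumW_cons]; omega
    have hlen : ((PySem.List.pyRange idx (idx + pvW x) 1).map fmt).length = (pvW x).toNat := by
      simp [PySem.List.length_pyRange_one]
    have hstepA : pvLoopA fmt (x :: tl) (d, idx) =
        pvLoopA fmt tl (d.insert x ((PySem.List.pyRange idx (idx + pvW x) 1).map fmt), idx + pvW x) := by
      by_cases h : x = "dpi" <;> simp [pvLoopA, pvW, h, add_assoc]
    have htake : PySem.List.slice ((PySem.List.pyRange idx (idx + pvSumW (x :: tl)) 1).map fmt)
        none (some (pvW x)) = (PySem.List.pyRange idx (idx + pvW x) 1).map fmt := by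
      rw [PySem.List.slice_to _ (le_of_lt hw), hsplit, List.map_append, ← hlen,
        List.take_left]
    have hdrop : PySem.List.slice ((PySem.List.pyRange idx (idx + pvSumW (x :: tl)) 1).map fmt)
        (some (pvW x)) none =
        (PySem.List.pyRange (idx + pvW x) (idx + pvW x + pvSumW tl) 1).map fmt := by
      rw [PySem.List.slice_from _ (le_of_lt hw), hsplit, List.map_append, ← hlen,
        List.drop_left]
      congr 2
      rw [pvSumW_cons]; ring
    rw [hstepA, ih]
    conv_rhs => rw [show pvAssign ((x :: tl)) _ d = pvAssign tl
      (PySem.List.slice ((PySem.List.pyRange idx (idx + pvSumW (x :: tl)) 1).map fmt) (some (pvW x)) none)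
      (d.insert x (PySem.List.slice ((PySem.List.pyRange idx (idx + pvSumW (x :: tl)) 1).map fmt) none (some (pvW x))))
      from by simp [pvAssign, pvW]]
    rw [htake, hdrop]

lemma pvFinal (nfs : List String) :
    (if (if nfs.contains "dpi" = true then (nfs.length : Int) + 16 else (nfs.length : Int)) = 1 then
       ((PySem.Dict.empty : PySem.Dict String (List String)).insert (nfs.headD "") [""]).items
     else if (if nfs.contains "dpi" = true then (nfs.length : Int) + 16 else (nfs.length : Int)) < 10 then
       (pvLoopA PySem.Int.toStr nfs (PySem.Dict.empty, 0)).1.items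
     else (pvLoopA pvFmt2 nfs (PySem.Dict.empty, 0)).1.items)
    =
    (if ((nfs.length : Int) + (if nfs.contains "dpi" = true then 16 else 0)) = 1 then
       ((PySem.Dict.empty : PySem.Dict String (List String)).insert (nfs.headD "") [""]).items
     else
       (pvAssign nfs
         ((PySem.List.pyRange 0 (nfs.foldl (fun s nf => s + (if nf = "dpi" then 17 else 1)) 0) 1).map
           (if ((nfs.length : Int) + (if nfs.contains "dpi" = true then 16 else 0)) < 10 then
              PySem.Int.toStr else pvFmt2))
         PySem.Dict.empty).items) := by
  have hnum : (if nfs.contains "dpi" = true then (nfs.length : Int) + 16 else (nfs.length : Int))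
      = (nfs.length : Int) + (if nfs.contains "dpi" = true then 16 else 0) := by
    split <;> simp
  have htot : nfs.foldl (fun s nf => s + (if nf = "dpi" then (17:Int) else 1)) 0 = pvSumW nfs := by
    simp [pvSumW, pvW]
  rw [hnum, htot]
  by_cases h1 : ((nfs.length : Int) + (if nfs.contains "dpi" = true then 16 else 0)) = 1
  · rw [if_pos h1, if_pos h1]
  · by_cases h2 : ((nfs.length : Int) + (if nfs.contains "dpi" = true then 16 else 0)) < 10
    · rw [if_neg h1, if_neg h1, if_pos h2, if_pos h2]
      have := pvLoop_eq_assign PySem.Int.toStr nfs PySem.Dict.empty 0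
      rw [zero_add] at this
      exact congrArg PySem.Dict.items this
    · rw [if_neg h1, if_neg h1, if_neg h2, if_neg h2]
      have := pvLoop_eq_assign pvFmt2 nfs PySem.Dict.empty 0
      rw [zero_add] at this
      exact congrArg PySem.Dict.items this

-- ===== VERDICT (by name: the statement is the Claim_ definition above) =====
theorem get_cpuids_from_name_spec : Claim_equal_get_cpuids_from_name := by
  intro nfs_str _
  exact pvFinal ((PySem.Str.split? nfs_str ".").getD [])
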